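-- pv_equiv track=rewrite | github.com/BEpaul/ps | boj/2493.py | get_top_with_laser
-- ===== SOURCE A (Python) =====
-- def get_top_with_laser(nums, nums_size):
--     stack = []
--     output = [0] * nums_size
--
--     for i in range(nums_size):
--         while stack:
--             if stack and nums[stack[-1]] >= nums[i]:
--                 output[i] = stack[-1] + 1
--                 break
--             else:
--                 stack.pop()
--
--         stack.append(i)
--
--     return output
-- ===== SOURCE B (Python) =====
-- def get_top_with_laser(nums, nums_size):
--     output = []
--     for i in range(nums_size):
--         res = 0
--         for j in range(i - 1, -1, -1):
--             if nums[j] >= nums[i]: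
--                 res = j + 1
--                 break
--         output.append(res)
--     return output
-- ===== Notes on version B (the rewrite author's own statement) =====
-- stated objective: simpler
-- what changed: Replaces the single-pass monotonic stack with a plain nested backward scan: for each i, look left for the first j with nums[j] >= nums[i].
import Mathlib
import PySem

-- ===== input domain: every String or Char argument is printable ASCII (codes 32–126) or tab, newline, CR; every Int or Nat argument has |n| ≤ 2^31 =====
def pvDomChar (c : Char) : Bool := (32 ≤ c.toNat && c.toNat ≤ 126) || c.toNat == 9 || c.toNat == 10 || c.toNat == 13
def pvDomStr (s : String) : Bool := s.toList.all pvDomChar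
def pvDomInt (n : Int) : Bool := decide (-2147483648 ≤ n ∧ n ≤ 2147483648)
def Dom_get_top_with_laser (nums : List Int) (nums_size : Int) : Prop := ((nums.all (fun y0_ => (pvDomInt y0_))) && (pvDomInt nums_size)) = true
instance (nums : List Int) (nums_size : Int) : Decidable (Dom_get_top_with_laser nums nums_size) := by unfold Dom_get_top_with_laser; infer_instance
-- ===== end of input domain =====

-- B is a simpler nested backward scan replacing A's monotonic stack; equal return values on Pre_ (where Python indexing is in range).

-- ===== PORT A =====
-- the 'while stack: …' loop of A: pop while nums[stack[-1]] < nums[i]; on break return stack[-1]+1,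
-- on empty stack return 0 (output[i] keeps its initial 0 either way).  Stack head = Python stack[-1].
def aWhile (nums : List Int) (xi : Int) : List Int → List Int × Int
  | [] => ([], 0)
  | t :: rest =>
    if xi ≤ PySem.List.pyGetD nums t 0 then (t :: rest, t + 1) else aWhile nums xi rest

def get_top_with_laser (nums : List Int) (nums_size : Int) : List Int :=
  (((List.range nums_size.toNat).foldl
    (fun (st : List Int × List Int) (i : Nat) =>
      let r := aWhile nums (PySem.List.pyGetD nums (i : Int) 0) st.1
      (((i : Int) :: r.1), st.2.set i r.2))
    ([], List.replicate nums_size.toNat 0))).2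

-- ===== PORT B =====
-- B's inner loop 'for j in range(i-1, -1, -1): …': first j below i with nums[j] >= nums[i], else 0
def bScan (nums : List Int) (v : Int) : Nat → Int
  | 0 => 0
  | j + 1 => if v ≤ PySem.List.pyGetD nums (j : Int) 0 then (j : Int) + 1 else bScan nums v j

def get_top_with_laser_alt (nums : List Int) (nums_size : Int) : List Int :=
  (List.range nums_size.toNat).map
    (fun (i : Nat) => bScan nums (PySem.List.pyGetD nums (↑i) 0) i)

-- ===== PRECONDITION & SPEC =====
-- Pre_ excludes exactly the inputs where both Pythons raise IndexError: nums_size > len(nums).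
def Pre_get_top_with_laser (nums : List Int) (nums_size : Int) : Prop :=
  nums_size ≤ (nums.length : Int)
instance (nums : List Int) (nums_size : Int) : Decidable (Pre_get_top_with_laser nums nums_size) := by
  unfold Pre_get_top_with_laser; infer_instance

def pvWitness_get_top_with_laser : List Int × Int := ([6, 9, 5, 7, 4], 5)

def Spec_get_top_with_laser (nums : List Int) (nums_size : Int) (out : List Int) : Prop := out = get_top_with_laser_alt nums nums_size
instance (nums : List Int) (nums_size : Int) (out : List Int) : Decidable (Spec_get_top_with_laser nums nums_size out) := by unfold Spec_get_top_with_laser; infer_instance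

-- ===== CLAIM (what is proved, stated in full; the proofs are below) =====
def Claim_equal_get_top_with_laser : Prop := ∀ (nums : List Int) (nums_size : Int), Dom_get_top_with_laser nums nums_size → Pre_get_top_with_laser nums nums_size → Spec_get_top_with_laser nums nums_size (get_top_with_laser nums nums_size)

-- ===== LEMMAS AND PROOFS =====

-- value of nums at a Nat index, as both ports read it
def gv (nums : List Int) (i : Nat) : Int := PySem.List.pyGetD nums (i : Int) 0

-- the canonical stack A holds at the start of iteration m (head = top = Python stack[-1])
def Sstk (nums : List Int) : Nat → List Nat
  | 0 => []
  | m + 1 => m :: (Sstk nums m).filter (fun j => decide (gv nums m ≤ gv nums j))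

-- values weakly increase from top of the stack downward
theorem Sstk_pairwise (nums : List Int) : ∀ m, (Sstk nums m).Pairwise (fun a b => gv nums a ≤ gv nums b) := by
  intro m
  induction m with
  | zero => simp [Sstk]
  | succ m ih =>
    refine List.pairwise_cons.mpr ⟨?_, ih.filter _⟩
    intro b hb
    have := List.of_mem_filter hb
    exact of_decide_eq_true this

-- the while loop on a value-monotone stack: pops exactly the < v prefix, i.e. filters, and
-- returns first-kept-index + 1 (or 0 on empty)
theorem aWhile_eq (nums : List Int) (v : Int) :
    ∀ l : List Nat, l.Pairwise (fun a b => gv nums a ≤ gv nums b) →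
      aWhile nums v (l.map (fun (j : Nat) => (j : Int))) =
        ((l.filter (fun j => decide (v ≤ gv nums j))).map (fun (j : Nat) => (j : Int)),
         match l.filter (fun j => decide (v ≤ gv nums j)) with
         | [] => 0
         | t :: _ => (t : Int) + 1) := by
  intro l hl
  induction l with
  | nil => simp only [List.map_nil, aWhile, List.filter_nil]
  | cons j l ih =>
    have hpair := List.pairwise_cons.mp hl
    simp only [List.map_cons, aWhile, List.filter_cons]
    rw [show PySem.List.pyGetD nums ((j : Nat) : Int) 0 = gv nums j from rfl]
    by_cases hj : v ≤ gv nums j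
    · have hrest : l.filter (fun j => decide (v ≤ gv nums j)) = l := by
        apply List.filter_eq_self.mpr
        intro b hb
        exact decide_eq_true (le_trans hj (hpair.1 b hb))
      rw [if_pos hj]
      have hq : decide (v ≤ gv nums j) = true := decide_eq_true hj
      simp only [hq, if_true, hrest, List.map_cons]
    · rw [if_neg hj]
      have hq : decide (v ≤ gv nums j) = false := decide_eq_false hj
      simp only [hq, Bool.false_eq_true, if_false]
      exact ih hpair.2

-- the first stack element with value ≥ v is exactly what B's backward scan finds
theorem head_filter_eq_bScan (nums : List Int) (v : Int) :
    ∀ m, (match (Sstk nums m).filter (fun j => decide (v ≤ gv nums j)) with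
          | [] => (0 : Int)
          | t :: _ => (t : Int) + 1) = bScan nums v m := by
  intro m
  induction m with
  | zero => simp only [Sstk, List.filter_nil, bScan]
  | succ m ih =>
    simp only [Sstk, List.filter_cons, bScan]
    rw [show PySem.List.pyGetD nums ((m : Nat) : Int) 0 = gv nums m from rfl]
    by_cases hm : v ≤ gv nums m
    · have hq : decide (v ≤ gv nums m) = true := decide_eq_true hm
      rw [if_pos hm]
      simp only [hq, if_true]
    · have hfilter :
        ((Sstk nums m).filter (fun j => decide (gv nums m ≤ gv nums j))).filter
            (fun j => decide (v ≤ gv nums j))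
          = (Sstk nums m).filter (fun j => decide (v ≤ gv nums j)) := by
        rw [List.filter_filter]
        apply List.filter_congr
        intro j _
        by_cases hj : v ≤ gv nums j
        · have h2 : gv nums m ≤ gv nums j := le_trans (le_of_lt (lt_of_not_ge hm)) hj
          simp [hj, h2]
        · simp [hj]
      have hq : decide (v ≤ gv nums m) = false := decide_eq_false hm
      rw [if_neg hm]
      simp only [hq, Bool.false_eq_true, if_false, hfilter, ih]

-- the output list after m of n iterations
def outAt (nums : List Int) (n m : Nat) : List Int :=
  (List.range n).map (fun i => if i < m then bScan nums (gv nums i) i else 0)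

theorem fold_invariant (nums : List Int) (n : Nat) :
    ∀ m, m ≤ n →
      (List.range m).foldl
        (fun (st : List Int × List Int) (i : Nat) =>
          let r := aWhile nums (PySem.List.pyGetD nums (i : Int) 0) st.1
          (((i : Int) :: r.1), st.2.set i r.2))
        ([], List.replicate n 0)
      = ((Sstk nums m).map (fun (j : Nat) => (j : Int)), outAt nums n m) := by
  intro m
  induction m with
  | zero =>
    intro _
    simp only [List.range_zero, List.foldl_nil, Sstk, List.map_nil, outAt]
    refine Prod.ext rfl ?_
    apply List.ext_getElem <;> simp
  | succ m ih =>
    intro hmn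
    rw [List.range_succ, List.foldl_append, ih (by omega), List.foldl_cons, List.foldl_nil]
    have hW := aWhile_eq nums (gv nums m) (Sstk nums m) (Sstk_pairwise nums m)
    simp only [show PySem.List.pyGetD nums ((m : Nat) : Int) 0 = gv nums m from rfl]
    rw [hW]
    refine Prod.ext ?_ ?_
    · rfl
    · simp only
      rw [head_filter_eq_bScan]
      apply List.ext_getElem
      · simp [outAt]
      · intro i h1 h2
        simp only [outAt, List.length_map, List.length_range] at h2
        by_cases hi : i = m
        · subst hi
          rw [List.getElem_set_self]
          simp only [outAt, List.getElem_map, List.getElem_range]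
          simp
        · rw [List.getElem_set_ne (by omega)]
          simp only [outAt, List.getElem_map, List.getElem_range]
          have h3 : (i < m) ↔ (i < m + 1) := by omega
          simp only [h3]

-- ===== VERDICT (by name: the statement is the Claim_ definition above) =====
theorem get_top_with_laser_spec : Claim_equal_get_top_with_laser := by
  intro nums nums_size _ _
  unfold Spec_get_top_with_laser get_top_with_laser get_top_with_laser_alt
  rw [fold_invariant nums nums_size.toNat nums_size.toNat (le_refl _)]
  simp only [outAt]
  apply List.map_congr_left
  intro i hi
  simp only [List.mem_range] at hi
  simp only [hi, if_true, gv]
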